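-- pv_equiv track=rewrite | github.com/achuthofficial/ireland | code/framework_improvement_analysis.py | generate_improvement_roadmap
-- ===== SOURCE A (Python) =====
-- from typing import Dict, List
--
-- def generate_improvement_roadmap(improvements: List[Dict]) -> Dict:
--     """Generate phased improvement roadmap."""
--
--     roadmap = {
--         "Phase 4A - Quick Wins (1-2 weeks)": [
--             i for i in improvements
--             if i['effort'] in ['Low', 'Very Low']
--         ],
--         "Phase 4B - Medium Term (1-2 months)": [
--             i for i in improvements
--             if i['effort'] == 'Medium'
--         ],
--         "Phase 4C - Long Term (3-6 months)": [
--             i for i in improvements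
--             if i['effort'] in ['High', 'Very High']
--         ]
--     }
--
--     return roadmap
-- ===== SOURCE B (Python) =====
-- def generate_improvement_roadmap(improvements):
--     """Generate phased improvement roadmap (single classification pass)."""
--     quick, medium, long_term = [], [], []
--     for i in improvements:
--         e = i['effort']
--         if e in ('Low', 'Very Low'):
--             quick.append(i)
--         elif e == 'Medium':
--             medium.append(i)
--         elif e in ('High', 'Very High'):
--             long_term.append(i)
--     return {
--         "Phase 4A - Quick Wins (1-2 weeks)": quick,
--         "Phase 4B - Medium Term (1-2 months)": medium,
--         "Phase 4C - Long Term (3-6 months)": long_term,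
--     }
-- ===== Notes on version B (the rewrite author's own statement) =====
-- stated objective: alternative
-- what changed: Replaces A's three independent filtering scans over the input with one classification pass that routes each item into its phase bucket via an if/elif chain.
import Mathlib
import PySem

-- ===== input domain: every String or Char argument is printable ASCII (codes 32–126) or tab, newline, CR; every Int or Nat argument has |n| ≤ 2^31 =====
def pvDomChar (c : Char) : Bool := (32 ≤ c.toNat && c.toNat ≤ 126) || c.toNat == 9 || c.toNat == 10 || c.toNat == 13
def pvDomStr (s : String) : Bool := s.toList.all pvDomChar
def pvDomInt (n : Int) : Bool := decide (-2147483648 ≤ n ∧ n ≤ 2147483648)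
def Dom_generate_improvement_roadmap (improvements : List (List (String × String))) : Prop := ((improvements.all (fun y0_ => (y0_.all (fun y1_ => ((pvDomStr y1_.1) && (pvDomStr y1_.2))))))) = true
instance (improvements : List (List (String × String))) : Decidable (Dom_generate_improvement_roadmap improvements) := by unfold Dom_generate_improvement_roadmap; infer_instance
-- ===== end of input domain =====

-- B replaces three filtering scans with a single classification pass (alternative decomposition, same results).


-- ===== PORT A =====
def pvLookup (i : List (String × String)) (k : String) : Option String :=
  (i.find? (fun p => p.1 == k)).map (·.2)

-- i['effort']; total via getD "" — Pre_ guarantees the key exists, so the default is never taken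
def pvEffort (i : List (String × String)) : String := (pvLookup i "effort").getD ""

def generate_improvement_roadmap (improvements : List (List (String × String))) : List (String × List (List (String × String))) :=
  [("Phase 4A - Quick Wins (1-2 weeks)",
      improvements.filter (fun i => pvEffort i == "Low" || pvEffort i == "Very Low")),
   ("Phase 4B - Medium Term (1-2 months)",
      improvements.filter (fun i => pvEffort i == "Medium")),
   ("Phase 4C - Long Term (3-6 months)",
      improvements.filter (fun i => pvEffort i == "High" || pvEffort i == "Very High"))]


-- ===== PORT B =====
def pvStep (acc : List (List (String × String)) × List (List (String × String)) × List (List (String × String)))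
    (i : List (String × String)) :
    List (List (String × String)) × List (List (String × String)) × List (List (String × String)) :=
  let e := pvEffort i
  if e == "Low" || e == "Very Low" then (acc.1 ++ [i], acc.2.1, acc.2.2)
  else if e == "Medium" then (acc.1, acc.2.1 ++ [i], acc.2.2)
  else if e == "High" || e == "Very High" then (acc.1, acc.2.1, acc.2.2 ++ [i])
  else acc

def generate_improvement_roadmap_alt (improvements : List (List (String × String))) : List (String × List (List (String × String))) :=
  let s := improvements.foldl pvStep ([], [], [])
  [("Phase 4A - Quick Wins (1-2 weeks)", s.1),
   ("Phase 4B - Medium Term (1-2 months)", s.2.1),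
   ("Phase 4C - Long Term (3-6 months)", s.2.2)]


-- ===== PRECONDITION & SPEC =====
-- Pre_ excludes exactly the items lacking an 'effort' key, on which Python A raises KeyError.
def Pre_generate_improvement_roadmap (improvements : List (List (String × String))) : Prop :=
  (improvements.all (fun i => i.any (fun p => p.1 == "effort"))) = true
instance (improvements : List (List (String × String))) : Decidable (Pre_generate_improvement_roadmap improvements) := by unfold Pre_generate_improvement_roadmap; infer_instance
def pvWitness_generate_improvement_roadmap : (List (List (String × String))) := [[("effort", "Low")], [("effort", "Medium")]]
def Spec_generate_improvement_roadmap (improvements : List (List (String × String))) (out : List (String × List (List (String × String)))) : Prop := out = generate_improvement_roadmap_alt improvements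
instance (improvements : List (List (String × String))) (out : List (String × List (List (String × String)))) : Decidable (Spec_generate_improvement_roadmap improvements out) := by unfold Spec_generate_improvement_roadmap; infer_instance

-- ===== CLAIM (what is proved, stated in full; the proofs are below) =====
def Claim_equal_generate_improvement_roadmap : Prop := ∀ (improvements : List (List (String × String))), Dom_generate_improvement_roadmap improvements → Pre_generate_improvement_roadmap improvements → Spec_generate_improvement_roadmap improvements (generate_improvement_roadmap improvements)

-- ===== LEMMAS AND PROOFS =====

theorem pvStep_loop (xs : List (List (String × String)))
    (a b c : List (List (String × String))) :
    xs.foldl pvStep (a, b, c) =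
      (a ++ xs.filter (fun i => pvEffort i == "Low" || pvEffort i == "Very Low"),
       b ++ xs.filter (fun i => pvEffort i == "Medium"),
       c ++ xs.filter (fun i => pvEffort i == "High" || pvEffort i == "Very High")) := by
  induction xs generalizing a b c with
  | nil => simp
  | cons x xs ih =>
    rw [List.foldl_cons]
    simp only [List.filter_cons]
    by_cases h1 : (pvEffort x == "Low" || pvEffort x == "Very Low") = true
    · have h2 : (pvEffort x == "Medium") = false := by
        rcases Bool.or_eq_true_iff.mp h1 with h | h <;> simp_all
      have h3 : (pvEffort x == "High" || pvEffort x == "Very High") = false := by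
        rcases Bool.or_eq_true_iff.mp h1 with h | h <;> simp_all
      have hs : pvStep (a, b, c) x = (a ++ [x], b, c) := by simp [pvStep, h1]
      rw [hs, ih]; simp [h1, h2, h3]
    · by_cases h2 : (pvEffort x == "Medium") = true
      · have h3 : (pvEffort x == "High" || pvEffort x == "Very High") = false := by simp_all
        have hs : pvStep (a, b, c) x = (a, b ++ [x], c) := by simp [pvStep, h1, h2]
        rw [hs, ih]; simp [h1, h2, h3]
      · by_cases h3 : (pvEffort x == "High" || pvEffort x == "Very High") = true
        · have hs : pvStep (a, b, c) x = (a, b, c ++ [x]) := by simp [pvStep, h1, h2, h3]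
          rw [hs, ih]; simp [h1, h2, h3]
        · have hs : pvStep (a, b, c) x = (a, b, c) := by simp [pvStep, h1, h2, h3]
          rw [hs, ih]; simp [h1, h2, h3]

-- ===== VERDICT (by name: the statement is the Claim_ definition above) =====
theorem generate_improvement_roadmap_spec : Claim_equal_generate_improvement_roadmap := by
  intro improvements _ _
  unfold Spec_generate_improvement_roadmap generate_improvement_roadmap generate_improvement_roadmap_alt
  simp [pvStep_loop]
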